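-- pv_equiv track=rewrite | github.com/agharib/ummfiltered | ummfiltered/verify.py | _max_missing_run
-- ===== SOURCE A (Python) =====
-- def _max_missing_run(expected_count: int, matched: set[int]) -> int:
--     max_run = 0
--     current_run = 0
--     for index in range(expected_count):
--         if index in matched:
--             current_run = 0
--             continue
--         current_run += 1
--         max_run = max(max_run, current_run)
--     return max_run
-- ===== SOURCE B (Python) =====
-- def _max_missing_run(expected_count: int, matched: set) -> int:
--     if expected_count <= 0:
--         return 0
--     ms = sorted({m for m in matched if 0 <= m < expected_count})
--     best = 0
--     prev = -1
--     for m in ms: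
--         best = max(best, m - prev - 1)
--         prev = m
--     return max(best, expected_count - prev - 1)
-- ===== Notes on version B (the rewrite author's own statement) =====
-- stated objective: alternative
-- what changed: Instead of scanning every index in range(expected_count) with a running-run counter, B sorts the in-range matched indices and takes the maximum gap between consecutive ones (with -1 and expected_count as virtual boundaries).
import Mathlib
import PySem

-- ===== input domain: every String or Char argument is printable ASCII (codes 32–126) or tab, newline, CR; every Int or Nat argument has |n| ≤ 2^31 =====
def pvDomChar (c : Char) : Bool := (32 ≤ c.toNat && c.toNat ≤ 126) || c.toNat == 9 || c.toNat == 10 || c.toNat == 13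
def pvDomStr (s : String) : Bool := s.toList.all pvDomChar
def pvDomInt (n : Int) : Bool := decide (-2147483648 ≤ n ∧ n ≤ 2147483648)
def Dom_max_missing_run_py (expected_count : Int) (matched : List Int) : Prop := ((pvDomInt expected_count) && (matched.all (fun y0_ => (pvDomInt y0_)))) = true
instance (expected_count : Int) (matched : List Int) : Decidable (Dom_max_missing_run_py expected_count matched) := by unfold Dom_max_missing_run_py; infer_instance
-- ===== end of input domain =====

-- B replaces A's scan over every index of range(expected_count) by sorting the
-- in-range matched indices and taking the maximum gap between consecutive ones
-- (objective: alternative algorithm, same result).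

-- ===== PORT A =====
def max_missing_run_py (expected_count : Int) (matched : List Int) : Int :=
  ((PySem.List.pyRange 0 expected_count 1).foldl
    (fun (s : Int × Int) index =>
      if index ∈ matched then (s.1, 0)
      else (max s.1 (s.2 + 1), s.2 + 1)) ((0 : Int), (0 : Int))).1

-- ===== PORT B =====
def max_missing_run_py_alt (expected_count : Int) (matched : List Int) : Int :=
  if expected_count ≤ 0 then 0
  else
    let ms := PySem.List.sorted
      (PySem.Set.ofList (matched.filter (fun m => decide (0 ≤ m) && decide (m < expected_count))))
      (fun x => x) false
    let bp := ms.foldl (fun (s : Int × Int) m => (max s.1 (m - s.2 - 1), m)) ((0 : Int), (-1 : Int))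
    max bp.1 (expected_count - bp.2 - 1)

-- ===== PRECONDITION & SPEC =====
def Spec_max_missing_run_py (expected_count : Int) (matched : List Int) (out : Int) : Prop := out = max_missing_run_py_alt expected_count matched
instance (expected_count : Int) (matched : List Int) (out : Int) : Decidable (Spec_max_missing_run_py expected_count matched out) := by unfold Spec_max_missing_run_py; infer_instance

-- ===== CLAIM (what is proved, stated in full; the proofs are below) =====
def Claim_equal_max_missing_run_py : Prop := ∀ (expected_count : Int) (matched : List Int), Dom_max_missing_run_py expected_count matched → Spec_max_missing_run_py expected_count matched (max_missing_run_py expected_count matched)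

-- ===== LEMMAS AND PROOFS =====

-- the strictly increasing list of matched indices below n
def pvL (matched : List Int) : Nat → List Int
  | 0 => []
  | n+1 => if ((n : Int) ∈ matched) then pvL matched n ++ [(n : Int)] else pvL matched n

theorem mem_pvL (matched : List Int) (n : Nat) (x : Int) :
    x ∈ pvL matched n ↔ x ∈ matched ∧ 0 ≤ x ∧ x < (n : Int) := by
  induction n with
  | zero => simp [pvL]
  | succ n ih =>
    have hcast : ((n + 1 : Nat) : Int) = (n : Int) + 1 := by push_cast; ring
    by_cases h : (n : Int) ∈ matched
    · simp only [pvL, if_pos h, List.mem_append, List.mem_singleton, ih, hcast]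
      constructor
      · rintro (⟨hm, h0, hl⟩ | rfl)
        · exact ⟨hm, h0, by omega⟩
        · exact ⟨h, by positivity, by omega⟩
      · rintro ⟨hm, h0, hl⟩
        by_cases hx : x = (n : Int)
        · exact Or.inr hx
        · exact Or.inl ⟨hm, h0, by omega⟩
    · simp only [pvL, if_neg h, ih, hcast]
      constructor
      · rintro ⟨hm, h0, hl⟩; exact ⟨hm, h0, by omega⟩
      · rintro ⟨hm, h0, hl⟩
        refine ⟨hm, h0, ?_⟩
        by_cases hx : x = (n : Int)
        · exact absurd (hx ▸ hm) h
        · omega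

theorem pairwise_pvL (matched : List Int) (n : Nat) : (pvL matched n).Pairwise (· < ·) := by
  induction n with
  | zero => simp [pvL]
  | succ n ih =>
    by_cases h : (n : Int) ∈ matched
    · simp only [pvL, if_pos h]
      refine List.pairwise_append.mpr ⟨ih, by simp, ?_⟩
      intro x hx y hy
      simp at hy; subst hy
      exact ((mem_pvL matched n x).mp hx).2.2
    · simpa [pvL, h] using ih

theorem sorted_filter_eq_pvL (matched : List Int) (n : Nat) :
    PySem.List.sorted
      (PySem.Set.ofList (matched.filter (fun m => decide (0 ≤ m) && decide (m < (n : Int)))))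
      (fun x => x) false = pvL matched n := by
  apply PySem.List.sorted_eq_of_perm_of_pairwise_lt
  · refine (List.perm_ext_iff_of_nodup ?_ ?_).mpr ?_
    · exact (pairwise_pvL matched n).nodup
    · exact PySem.Set.nodup_ofList _
    · intro x
      rw [mem_pvL, PySem.Set.mem_ofList, List.mem_filter]
      simp
  · exact pairwise_pvL matched n

theorem foldB_fst_nonneg (l : List Int) (b p : Int) (hb : 0 ≤ b) :
    0 ≤ (l.foldl (fun (s : Int × Int) m => (max s.1 (m - s.2 - 1), m)) (b, p)).1 := by
  induction l generalizing b p with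
  | nil => exact hb
  | cons x t ih => exact ih _ _ (le_trans hb (le_max_left _ _))

theorem main_invariant (matched : List Int) (n : Nat) :
    (PySem.List.pyRange 0 (n : Int) 1).foldl
      (fun (s : Int × Int) index =>
        if index ∈ matched then (s.1, 0)
        else (max s.1 (s.2 + 1), s.2 + 1)) ((0 : Int), (0 : Int))
    = (max ((pvL matched n).foldl (fun (s : Int × Int) m => (max s.1 (m - s.2 - 1), m)) ((0:Int), (-1:Int))).1
           ((n : Int) - ((pvL matched n).foldl (fun (s : Int × Int) m => (max s.1 (m - s.2 - 1), m)) ((0:Int), (-1:Int))).2 - 1),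
       (n : Int) - ((pvL matched n).foldl (fun (s : Int × Int) m => (max s.1 (m - s.2 - 1), m)) ((0:Int), (-1:Int))).2 - 1) := by
  induction n with
  | zero => simp [pvL, PySem.List.pyRange_one_eq_nil]
  | succ n ih =>
    have hsplit : PySem.List.pyRange 0 ((n : Int) + 1) 1
        = PySem.List.pyRange 0 (n : Int) 1 ++ [(n : Int)] :=
      PySem.List.pyRange_one_succ_right (by positivity)
    push_cast
    rw [hsplit, List.foldl_append, ih]
    by_cases h : (n : Int) ∈ matched
    · have hb : 0 ≤ ((pvL matched n).foldl (fun (s : Int × Int) m => (max s.1 (m - s.2 - 1), m)) ((0:Int), (-1:Int))).1 :=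
        foldB_fst_nonneg _ _ _ le_rfl
      simp only [pvL, if_pos h, List.foldl_append, List.foldl_cons, List.foldl_nil]
      ext <;> simp <;> omega
    · simp only [pvL, if_neg h, List.foldl_cons, List.foldl_nil]
      ext <;> simp <;> omega

-- ===== VERDICT (by name: the statement is the Claim_ definition above) =====
theorem max_missing_run_py_spec : Claim_equal_max_missing_run_py := by
  intro ec matched _
  unfold Spec_max_missing_run_py max_missing_run_py max_missing_run_py_alt
  by_cases hle : ec ≤ 0
  · simp [hle, PySem.List.pyRange_one_eq_nil hle]
  · have h0 : 0 < ec := lt_of_not_ge hle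
    have hn : ec = (ec.toNat : Int) := (Int.toNat_of_nonneg h0.le).symm
    rw [if_neg hle]
    rw [hn, main_invariant matched ec.toNat, sorted_filter_eq_pvL matched ec.toNat]
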